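-- pv_equiv track=rewrite | github.com/jeffreyhorn/nlp2mcp | src/ir/preprocessor.py | normalize_double_commas
-- ===== SOURCE A (Python) =====
-- def normalize_double_commas(source: str) -> str:
--     """Replace double commas with single commas in data blocks.
--
--     Issue #565: GAMS allows double commas in set/parameter data as visual
--     alignment or placeholder. This function normalizes them to single commas.
--
--     Args:
--         source: GAMS source code text
--
--     Returns:
--         Source code with double commas replaced by single commas
--
--     Example:
--         Set l / b 'base',, c 'competitive' /;
--
--         Set l / b 'base', c 'competitive' /;
--
--     Notes:
--         - Replaces all occurrences of two-or-more consecutive commas with a single comma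
--           when they appear outside of quoted strings
--         - Leaves commas inside single-quoted strings unchanged
--         - Runs before full parsing, using a simple single-quote aware scan to respect
--           string boundaries
--     """
--     # Perform a single-pass scan, collapsing comma runs only outside of strings.
--     result: list[str] = []
--     in_string = False
--     i = 0
--     length = len(source)
--
--     while i < length:
--         ch = source[i]
--
--         if ch == "'":
--             # Handle GAMS-style escaped quote inside strings: '' -> literal '
--             if in_string and i + 1 < length and source[i + 1] == "'":
--                 result.append("''")
--                 i += 2
--                 continue
--             in_string = not in_string
--             result.append(ch)
--             i += 1
--             continue
--
--         if not in_string and ch == ",":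
--             # Collapse any run of commas outside strings to a single comma.
--             result.append(",")
--             i += 1
--             while i < length and source[i] == ",":
--                 i += 1
--             continue
--
--         result.append(ch)
--         i += 1
--
--     return "".join(result)
-- ===== SOURCE B (Python) =====
-- def normalize_double_commas(source: str) -> str:
--     # Single state-machine pass with a previous-character register: a comma is
--     # dropped iff the preceding character was also a comma and we are outside a
--     # quoted string; no index arithmetic, lookahead or inner skip loop needed.
--     out = []
--     in_string = False
--     prev = ''
--     for ch in source:
--         if ch == "'":
--             in_string = not in_string
--         if ch != ',' or in_string or prev != ',':
--             out.append(ch)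
--         prev = ch
--     return ''.join(out)
-- ===== Notes on version B (the rewrite author's own statement) =====
-- stated objective: simpler
-- what changed: Replaced the index-based scan with quote lookahead and an inner comma-skipping while loop by a single uniform for-loop state machine that tracks only the in-string flag and the previous character, dropping a comma exactly when the previous character was a comma outside a string.
import Mathlib
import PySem

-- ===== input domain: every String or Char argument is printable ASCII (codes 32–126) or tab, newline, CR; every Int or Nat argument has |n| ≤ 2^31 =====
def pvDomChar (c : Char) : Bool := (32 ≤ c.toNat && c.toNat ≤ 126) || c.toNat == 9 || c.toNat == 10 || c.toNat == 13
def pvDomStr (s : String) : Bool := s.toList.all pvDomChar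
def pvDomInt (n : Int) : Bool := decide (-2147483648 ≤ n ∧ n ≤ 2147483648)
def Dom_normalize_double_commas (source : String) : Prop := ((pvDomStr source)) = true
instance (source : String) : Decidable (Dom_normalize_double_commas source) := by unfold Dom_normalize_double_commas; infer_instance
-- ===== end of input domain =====

-- B replaces A's index scan (with quote lookahead and an inner comma-skipping loop) by a
-- single uniform state-machine pass over the characters that remembers only the previous
-- character; objective: simpler.

-- ===== PORT A =====
-- inner `while i < length and source[i] == ','` skip loop
def pvSkipCommas : List Char → List Char
  | [] => []
  | c :: rest => if c = ',' then pvSkipCommas rest else c :: rest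

lemma pvSkipCommas_length_le (l : List Char) : (pvSkipCommas l).length ≤ l.length := by
  induction l with
  | nil => simp [pvSkipCommas]
  | cons c rest ih =>
    simp only [pvSkipCommas]
    split
    · exact Nat.le_succ_of_le ih
    · simp

-- the main `while i < length` scan, as recursion over the remaining suffix with the same state
def pvLoopA : List Char → Bool → List Char
  | [], _ => []
  | '\'' :: '\'' :: rest2, true => '\'' :: '\'' :: pvLoopA rest2 true
  | '\'' :: rest, inStr => '\'' :: pvLoopA rest (!inStr)
  | ',' :: rest, false => ',' :: pvLoopA (pvSkipCommas rest) false
  | c :: rest, inStr => c :: pvLoopA rest inStr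
termination_by l => l.length
decreasing_by
  all_goals first
    | (simpa using Nat.lt_succ_of_le (pvSkipCommas_length_le rest))
    | (simp; omega)
    | simp

def normalize_double_commas (source : String) : String :=
  String.ofList (pvLoopA source.toList false)

-- ===== PORT B =====
-- one step of the `for ch in source` loop; state = (in_string, prev, out)
def pvStepB (st : Bool × Option Char × List Char) (ch : Char) : Bool × Option Char × List Char :=
  let inStr := if ch = '\'' then !st.1 else st.1
  let out := if ch ≠ ',' ∨ inStr = true ∨ st.2.1 ≠ some ',' then st.2.2 ++ [ch] else st.2.2
  (inStr, some ch, out)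

def normalize_double_commas_alt (source : String) : String :=
  String.ofList (source.toList.foldl pvStepB (false, none, [])).2.2

-- ===== PRECONDITION & SPEC =====
def Spec_normalize_double_commas (source : String) (out : String) : Prop := out = normalize_double_commas_alt source
instance (source : String) (out : String) : Decidable (Spec_normalize_double_commas source out) := by unfold Spec_normalize_double_commas; infer_instance

-- ===== CLAIM (what is proved, stated in full; the proofs are below) =====
def Claim_equal_normalize_double_commas : Prop := ∀ (source : String), Dom_normalize_double_commas source → Spec_normalize_double_commas source (normalize_double_commas source)

-- ===== LEMMAS AND PROOFS =====

lemma loopA_nil (b : Bool) : pvLoopA [] b = [] := by simp [pvLoopA]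

lemma loopA_quote_false (rest : List Char) :
    pvLoopA ('\'' :: rest) false = '\'' :: pvLoopA rest true := by
  cases rest with
  | nil => simp [pvLoopA]
  | cons c2 r2 => by_cases h : c2 = '\'' <;> simp [pvLoopA, h]

lemma loopA_quote_true_quote (rest : List Char) :
    pvLoopA ('\'' :: '\'' :: rest) true = '\'' :: '\'' :: pvLoopA rest true := by
  simp [pvLoopA]

lemma loopA_quote_true_other (c : Char) (rest : List Char) (h : c ≠ '\'') :
    pvLoopA ('\'' :: c :: rest) true = '\'' :: pvLoopA (c :: rest) false := by
  simp [pvLoopA, h]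

lemma loopA_quote_true_nil : pvLoopA ['\''] true = ['\''] := by
  simp [pvLoopA]

lemma loopA_comma_false (rest : List Char) :
    pvLoopA (',' :: rest) false = ',' :: pvLoopA (pvSkipCommas rest) false := by
  simp [pvLoopA]

lemma loopA_other (c : Char) (rest : List Char) (inStr : Bool)
    (h1 : c ≠ '\'') (h2 : inStr = true ∨ c ≠ ',') :
    pvLoopA (c :: rest) inStr = c :: pvLoopA rest inStr := by
  rcases h2 with h2 | h2
  · subst h2; simp [pvLoopA, h1]
  · cases inStr <;> simp [pvLoopA, h1, h2]

lemma foldB_gen (l : List Char) : ∀ st : Bool × Option Char × List Char,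
    (List.foldl pvStepB st l).2.2 = st.2.2 ++ (List.foldl pvStepB (st.1, st.2.1, []) l).2.2 := by
  induction l with
  | nil => intro st; simp
  | cons c rest ih =>
    intro st
    rw [List.foldl_cons, List.foldl_cons, ih (pvStepB st c),
      ih (pvStepB (st.1, st.2.1, []) c)]
    obtain ⟨i, p, out⟩ := st
    simp only [pvStepB]
    split_ifs <;> simp

lemma foldB_out (l : List Char) (i : Bool) (p : Option Char) (out : List Char) :
    (List.foldl pvStepB (i, p, out) l).2.2 = out ++ (List.foldl pvStepB (i, p, []) l).2.2 := by
  simpa using foldB_gen l (i, p, out)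

lemma foldB_skip (l : List Char) : ∀ acc : List Char,
    List.foldl pvStepB (false, some ',', acc) l
      = List.foldl pvStepB (false, some ',', acc) (pvSkipCommas l) := by
  induction l with
  | nil => intro acc; simp [pvSkipCommas]
  | cons c rest ih =>
    intro acc
    by_cases hc : c = ','
    · subst hc
      have hstep : pvStepB (false, some ',', acc) ',' = (false, some ',', acc) := by
        simp [pvStepB]
      simp only [pvSkipCommas, List.foldl, hstep]
      exact ih acc
    · simp [pvSkipCommas, hc]

lemma pvSkipCommas_head (l : List Char) : (pvSkipCommas l).head? ≠ some ',' := by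
  induction l with
  | nil => simp [pvSkipCommas]
  | cons c rest ih =>
    simp only [pvSkipCommas]
    split
    · exact ih
    · simpa using (by assumption : ¬ c = ',')

lemma main_inv (n : ℕ) : ∀ (l : List Char) (inStr : Bool) (prev : Option Char),
    l.length ≤ n → (prev = some ',' → inStr = false → l.head? ≠ some ',') →
    (List.foldl pvStepB (inStr, prev, []) l).2.2 = pvLoopA l inStr := by
  induction n with
  | zero =>
    intro l inStr prev hl _
    have : l = [] := List.eq_nil_of_length_eq_zero (Nat.le_zero.mp hl)
    subst this; simp [loopA_nil]
  | succ n ih =>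
    intro l inStr prev hl hp
    match l with
    | [] => simp [loopA_nil]
    | c :: rest =>
      have hrest : rest.length ≤ n := by simpa using Nat.succ_le_succ_iff.mp (by simpa using hl)
      by_cases hc : c = '\''
      · subst hc
        have hstep : pvStepB (inStr, prev, []) '\'' = (!inStr, some '\'', ['\'']) := by
          simp [pvStepB]
        cases inStr with
        | false =>
          simp only [List.foldl, hstep, Bool.not_false]
          rw [foldB_out, ih rest true (some '\'') hrest (by simp), loopA_quote_false]
          simp
        | true =>
          simp only [List.foldl, hstep, Bool.not_true]
          rw [foldB_out]
          match rest with
          | [] => simp [loopA_quote_true_nil]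
          | c2 :: rest2 =>
            have hr2 : rest2.length ≤ n := by
              simp only [List.length_cons] at hrest; omega
            by_cases hc2 : c2 = '\''
            · subst hc2
              have hstep2 : pvStepB (false, some '\'', []) '\'' = (true, some '\'', ['\'']) := by
                simp [pvStepB]
              simp only [List.foldl, hstep2]
              rw [foldB_out, ih rest2 true (some '\'') hr2 (by simp), loopA_quote_true_quote]
              simp
            · rw [ih (c2 :: rest2) false (some '\'') hrest (by simp),
                loopA_quote_true_other c2 rest2 hc2]
              simp
      · by_cases hcm : c = ','
        · subst hcm
          cases inStr with
          | true =>
            have hstep : pvStepB (true, prev, []) ',' = (true, some ',', [',']) := by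
              simp [pvStepB]
            simp only [List.foldl, hstep]
            rw [foldB_out, ih rest true (some ',') hrest (by simp),
              loopA_other ',' rest true hc (Or.inl rfl)]
            simp
          | false =>
            have hprev : prev ≠ some ',' := by
              intro h
              exact (hp h rfl) (by simp)
            have hstep : pvStepB (false, prev, []) ',' = (false, some ',', [',']) := by
              simp [pvStepB, hprev]
            simp only [List.foldl, hstep]
            rw [foldB_out, foldB_skip,
              ih (pvSkipCommas rest) false (some ',')
                (le_trans (pvSkipCommas_length_le rest) hrest)
                (fun _ _ => pvSkipCommas_head rest),
              loopA_comma_false]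
            simp
        · have hstep : pvStepB (inStr, prev, []) c = (inStr, some c, [c]) := by
            simp [pvStepB, hc, hcm]
          simp only [List.foldl, hstep]
          rw [foldB_out, ih rest inStr (some c) hrest (by simp [hcm]),
            loopA_other c rest inStr hc (Or.inr hcm)]
          simp

-- ===== VERDICT (by name: the statement is the Claim_ definition above) =====
theorem normalize_double_commas_spec : Claim_equal_normalize_double_commas := by
  intro source _
  unfold Spec_normalize_double_commas normalize_double_commas normalize_double_commas_alt
  rw [main_inv source.toList.length source.toList false none le_rfl (by simp)]
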